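-- pv_equiv track=rewrite | github.com/Nxtra/H-rank | ProblemSolving/python/ClimbingLeaderboard4.py | find_positions_in_desc_order
-- ===== SOURCE A (Python) =====
-- def find_positions_in_desc_order(scores, scores_alice_in_desc_order):
--     positions = []
--     index_scores = 0
--     index_alice_scores = 0
--     scores.append(0)
--     len_scores = len(scores)
--     len_scores_alice = len(scores_alice_in_desc_order)
--     while index_scores < len_scores and index_alice_scores < len_scores_alice:
--         score_alice = scores_alice_in_desc_order[index_alice_scores]
--         if score_alice >= scores[index_scores]:
--             current_position = index_scores + 1
--             positions.append(current_position)
--             index_alice_scores += 1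
--         else:
--             index_scores += 1
--     return positions
-- ===== SOURCE B (Python) =====
-- # Per-query binary search over the board's running minima (resumed from the previous
-- # answer) instead of an interleaved two-pointer merge; keeps the scores.append(0) mutation.
-- def find_positions_in_desc_order(scores, scores_alice_in_desc_order):
--     scores.append(0)
--     # rank of a query = 1 + first position whose running minimum is <= it;
--     # running minima are non-increasing, so each query is a binary search,
--     # resumed from the previous answer because answers only move right.
--     mins = []
--     for s in scores:
--         mins.append(s if not mins or s < mins[-1] else mins[-1])
--     positions = []
--     lo = 0
--     for a in scores_alice_in_desc_order:
--         hi = len(mins)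
--         while lo < hi:
--             mid = (lo + hi) // 2
--             if mins[mid] <= a:
--                 hi = mid
--             else:
--                 lo = mid + 1
--         if lo == len(mins):
--             break
--         positions.append(lo + 1)
--     return positions
-- ===== Notes on version B (the rewrite author's own statement) =====
-- stated objective: alternative
-- what changed: Replaces A's interleaved two-pointer merge (one shared forward scan driven by both index variables) with a precomputed running-minimum array queried by an independent binary search per Alice score, each search window resuming at the previous answer; both keep the scores.append(0) mutation.
import Mathlib
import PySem

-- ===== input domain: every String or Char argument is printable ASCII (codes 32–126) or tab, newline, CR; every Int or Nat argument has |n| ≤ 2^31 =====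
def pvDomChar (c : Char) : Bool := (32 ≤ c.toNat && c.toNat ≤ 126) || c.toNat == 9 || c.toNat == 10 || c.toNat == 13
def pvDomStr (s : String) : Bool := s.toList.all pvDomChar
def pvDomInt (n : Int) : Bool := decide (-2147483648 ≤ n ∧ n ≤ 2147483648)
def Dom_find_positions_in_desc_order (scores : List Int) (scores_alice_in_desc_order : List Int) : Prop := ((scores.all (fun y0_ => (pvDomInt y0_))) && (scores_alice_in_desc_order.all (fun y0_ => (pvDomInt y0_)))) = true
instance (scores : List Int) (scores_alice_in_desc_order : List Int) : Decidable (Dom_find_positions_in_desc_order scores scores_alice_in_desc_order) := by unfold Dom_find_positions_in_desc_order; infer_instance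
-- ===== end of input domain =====

-- B answers each query by a binary search over the board's running minima instead of A's
-- interleaved two-pointer merge (objective: alternative, same return value; both Pythons mutate
-- the `scores` argument by appending 0 — the equivalence proved is about the return value).

-- ===== PORT A =====
-- termination measures for the two loops, cited by name in decreasing_by
theorem pvA_dec1 (sl al i j : Nat) (h : j < al) :
    (sl - i) + (al - (j + 1)) < (sl - i) + (al - j) :=
  Nat.add_lt_add_left (Nat.sub_succ_lt_self al j h) (sl - i)
theorem pvA_dec2 (sl al i j : Nat) (h : i < sl) :
    (sl - (i + 1)) + (al - j) < (sl - i) + (al - j) :=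
  Nat.add_lt_add_right (Nat.sub_succ_lt_self sl i h) (al - j)
theorem pvBisect_mid_lt (lo hi : Nat) (h : lo < hi) : (lo + hi) / 2 < hi :=
  Nat.div_lt_of_lt_mul (by rw [Nat.two_mul]; exact Nat.add_lt_add_right h hi)
theorem pvBisect_le_mid (lo hi : Nat) (h : lo < hi) : lo ≤ (lo + hi) / 2 :=
  (Nat.le_div_iff_mul_le two_pos).mpr
    (by rw [Nat.mul_comm, Nat.two_mul]; exact Nat.add_le_add_left (Nat.le_of_lt h) lo)
theorem pvBisect_dec1 (lo hi : Nat) (h : lo < hi) : (lo + hi) / 2 - lo < hi - lo :=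
  Nat.sub_lt_sub_right (pvBisect_le_mid lo hi h) (pvBisect_mid_lt lo hi h)
theorem pvBisect_dec2 (lo hi : Nat) (h : lo < hi) : hi - ((lo + hi) / 2 + 1) < hi - lo :=
  Nat.sub_lt_sub_left h (Nat.lt_succ_of_le (pvBisect_le_mid lo hi h))

-- A's while-loop over the two indices; `getD _ 0` is exact here: both indices are in range by the loop guard.
def pvA_loop (s alice : List Int) (i j : Nat) (positions : List Int) : List Int :=
  if h : i < s.length ∧ j < alice.length then
    let score_alice := alice.getD j 0
    if s.getD i 0 ≤ score_alice then
      pvA_loop s alice i (j + 1) (positions ++ [(i : Int) + 1])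
    else
      pvA_loop s alice (i + 1) j positions
  else positions
termination_by (s.length - i) + (alice.length - j)
decreasing_by
  · exact pvA_dec1 s.length alice.length i j h.2
  · exact pvA_dec2 s.length alice.length i j h.1

def find_positions_in_desc_order (scores : List Int) (scores_alice_in_desc_order : List Int) : List Int :=
  pvA_loop (scores ++ [0]) scores_alice_in_desc_order 0 0 []

-- ===== PORT B =====
-- B's first for-loop: mins.append(s if not mins or s < mins[-1] else mins[-1])
def pvMins (s : List Int) : List Int :=
  s.foldl (fun mins x =>
    mins ++ [match mins.getLast? with
             | none => x
             | some m => if x < m then x else m]) []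

-- B's inner while-loop mutating lo and hi; `getD _ 0` is exact: mid < hi ≤ mins.length throughout.
def pvBisect (mins : List Int) (a : Int) (lo hi : Nat) : Nat :=
  if _h : lo < hi then
    let mid := (lo + hi) / 2
    if mins.getD mid 0 ≤ a then pvBisect mins a lo mid
    else pvBisect mins a (mid + 1) hi
  else lo
termination_by hi - lo
decreasing_by
  · exact pvBisect_dec1 lo hi _h
  · exact pvBisect_dec2 lo hi _h

-- B's outer for-loop over the alice scores carrying lo and positions.
def pvB_loop (mins alice : List Int) (lo : Nat) (positions : List Int) : List Int :=
  match alice with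
  | [] => positions
  | a :: rest =>
    let r := pvBisect mins a lo mins.length
    if r = mins.length then positions
    else pvB_loop mins rest r (positions ++ [(r : Int) + 1])

def find_positions_in_desc_order_alt (scores : List Int) (scores_alice_in_desc_order : List Int) : List Int :=
  pvB_loop (pvMins (scores ++ [0])) scores_alice_in_desc_order 0 []

-- ===== PRECONDITION & SPEC =====
def Spec_find_positions_in_desc_order (scores : List Int) (scores_alice_in_desc_order : List Int) (out : List Int) : Prop := out = find_positions_in_desc_order_alt scores scores_alice_in_desc_order
instance (scores : List Int) (scores_alice_in_desc_order : List Int) (out : List Int) : Decidable (Spec_find_positions_in_desc_order scores scores_alice_in_desc_order out) := by unfold Spec_find_positions_in_desc_order; infer_instance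

-- ===== CLAIM (what is proved, stated in full; the proofs are below) =====
def Claim_equal_find_positions_in_desc_order : Prop := ∀ (scores : List Int) (scores_alice_in_desc_order : List Int), Dom_find_positions_in_desc_order scores scores_alice_in_desc_order → Spec_find_positions_in_desc_order scores scores_alice_in_desc_order (find_positions_in_desc_order scores scores_alice_in_desc_order)

-- ===== LEMMAS AND PROOFS =====

-- A's scan for one fixed alice score, characterised by findIdx? on the dropped suffix: no hit → the
-- loop runs the scores pointer off the end and returns the accumulator.
theorem pvA_scan_none (s alice : List Int) (j : Nat) (hj : j < alice.length) :
    ∀ i acc, (s.drop i).findIdx? (fun x => x ≤ alice.getD j 0) = none →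
      pvA_loop s alice i j acc = acc := by
  intro i
  induction hm : s.length - i using Nat.strong_induction_on generalizing i with
  | _ m ih =>
    intro acc hnone
    by_cases hi : i < s.length
    · rw [List.drop_eq_getElem_cons hi, List.findIdx?_eq_none_iff] at hnone
      have h1 : ¬ (s[i] ≤ alice.getD j 0) := by
        have := hnone s[i] (List.mem_cons_self ..)
        simpa using this
      rw [pvA_loop]
      rw [dif_pos ⟨hi, hj⟩, if_neg (by rwa [List.getD_eq_getElem _ _ hi])]
      have h2 : (s.drop (i+1)).findIdx? (fun x => x ≤ alice.getD j 0) = none := by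
        rw [List.findIdx?_eq_none_iff]; intro x hx
        exact hnone x (List.mem_cons_of_mem _ hx)
      exact ih (s.length - (i+1)) (by omega) (i+1) rfl acc h2
    · rw [pvA_loop, dif_neg (by omega)]

-- … and a first hit at offset d → the loop appends i+d+1 and moves to the next alice score.
theorem pvA_scan_some (s alice : List Int) (j : Nat) (hj : j < alice.length) :
    ∀ i d acc, (s.drop i).findIdx? (fun x => x ≤ alice.getD j 0) = some d →
      pvA_loop s alice i j acc
        = pvA_loop s alice (i + d) (j + 1) (acc ++ [((i + d : Nat) : Int) + 1]) := by
  intro i d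
  induction d generalizing i with
  | zero =>
    intro acc hsome
    have hi : i < s.length := by
      by_contra hge
      rw [List.drop_eq_nil_of_le (by omega)] at hsome
      simp at hsome
    rw [List.drop_eq_getElem_cons hi, List.findIdx?_cons] at hsome
    by_cases hp : s[i] ≤ alice.getD j 0
    · rw [pvA_loop, dif_pos ⟨hi, hj⟩, if_pos (by rwa [List.getD_eq_getElem _ _ hi])]
      simp
    · rw [if_neg (by simpa using hp)] at hsome
      simp [Option.map_eq_some_iff] at hsome
  | succ e ihe =>
    intro acc hsome
    have hi : i < s.length := by
      by_contra hge
      rw [List.drop_eq_nil_of_le (by omega)] at hsome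
      simp at hsome
    rw [List.drop_eq_getElem_cons hi, List.findIdx?_cons] at hsome
    by_cases hp : s[i] ≤ alice.getD j 0
    · rw [if_pos (by simpa using hp)] at hsome
      simp at hsome
    · rw [if_neg (by simpa using hp), Option.map_eq_some_iff] at hsome
      obtain ⟨e', he', heq⟩ := hsome
      have he'e : e' = e := by omega
      rw [he'e] at he'
      rw [pvA_loop, dif_pos ⟨hi, hj⟩, if_neg (by rwa [List.getD_eq_getElem _ _ hi])]
      rw [ihe (i + 1) acc he']
      have h3 : i + 1 + e = i + (e + 1) := by omega
      rw [h3]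

-- ---- characterising pvMins through a structural running-minimum model ----

def pvPM (m : Int) : List Int → List Int
  | [] => []
  | x :: r => min m x :: pvPM (min m x) r

theorem pvMins_foldl (l : List Int) :
    ∀ acc m, acc.getLast? = some m →
      l.foldl (fun mins x =>
        mins ++ [match mins.getLast? with
                 | none => x
                 | some m => if x < m then x else m]) acc = acc ++ pvPM m l := by
  induction l with
  | nil => intro acc m _; simp [pvPM]
  | cons x r ih =>
    intro acc m hm
    have hstep : acc ++ [match acc.getLast? with
                         | none => x
                         | some m => if x < m then x else m] = acc ++ [min m x] := by
      rw [hm]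
      congr 2
      simp [min_def]
      split_ifs <;> omega
    simp only [List.foldl_cons]
    rw [hstep, ih (acc ++ [min m x]) (min m x) (by simp)]
    simp [pvPM]

theorem pvMins_cons (x : Int) (r : List Int) : pvMins (x :: r) = x :: pvPM x r := by
  unfold pvMins
  simp only [List.foldl_cons]
  have : ([] : List Int) ++ [match ([] : List Int).getLast? with
                             | none => x
                             | some m => if x < m then x else m] = [x] := by simp
  rw [this, pvMins_foldl r [x] x (by simp)]
  simp

theorem pvPM_length (m : Int) (l : List Int) : (pvPM m l).length = l.length := by
  induction l generalizing m with
  | nil => simp [pvPM]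
  | cons x r ih => simp [pvPM, ih]

theorem pvMins_length (s : List Int) : (pvMins s).length = s.length := by
  cases s with
  | nil => rfl
  | cons x r => rw [pvMins_cons]; simp [pvPM_length]

theorem pvPM_getD (m : Int) (l : List Int) :
    ∀ i, i < l.length → (pvPM m l).getD i 0 = (l.take (i + 1)).foldl min m := by
  induction l generalizing m with
  | nil => intro i hi; simp at hi
  | cons x r ih =>
    intro i hi
    cases i with
    | zero => simp [pvPM]
    | succ i =>
      simp only [pvPM, List.getD_cons_succ, List.take_succ_cons, List.foldl_cons]
      exact ih (min m x) i (by simpa using hi)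

theorem pvMins_getD (x : Int) (r : List Int) :
    ∀ i, i < (x :: r).length →
      (pvMins (x :: r)).getD i 0 = ((x :: r).take (i + 1)).foldl min x := by
  intro i hi
  rw [pvMins_cons]
  cases i with
  | zero => simp
  | succ i =>
    simp only [List.getD_cons_succ, List.take_succ_cons, List.foldl_cons, min_self]
    exact pvPM_getD x r i (by simpa using hi)

-- folding min over a list: basic facts
theorem foldl_min_le_init (m : Int) (l : List Int) : l.foldl min m ≤ m := by
  induction l generalizing m with
  | nil => simp
  | cons y ys ih => simpa using le_trans (ih (min m y)) (min_le_left m y)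

theorem foldl_min_le_mem (l : List Int) (y : Int) :
    ∀ m, y ∈ l → l.foldl min m ≤ y := by
  induction l with
  | nil => intro m hy; simp at hy
  | cons z zs ih =>
    intro m hy
    rcases List.mem_cons.mp hy with h | h
    · rw [h]
      exact le_trans (foldl_min_le_init (min m z) zs) (min_le_right m z)
    · exact ih (min m z) h

theorem foldl_min_le_iff (l : List Int) (a : Int) :
    ∀ m, l.foldl min m ≤ a ↔ m ≤ a ∨ ∃ y ∈ l, y ≤ a := by
  induction l with
  | nil => intro m; simp
  | cons z zs ih =>
    intro m
    simp only [List.foldl_cons, ih (min m z), List.mem_cons]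
    constructor
    · rintro (h | ⟨y, hy, hya⟩)
      · rcases le_total m z with hmz | hzm
        · exact Or.inl (by rwa [min_eq_left hmz] at h)
        · exact Or.inr ⟨z, Or.inl rfl, by rwa [min_eq_right hzm] at h⟩
      · exact Or.inr ⟨y, Or.inr hy, hya⟩
    · rintro (h | ⟨y, hy | hy, hya⟩)
      · exact Or.inl (le_trans (min_le_left m z) h)
      · exact Or.inl (le_trans (min_le_right m z) (hy ▸ hya))
      · exact Or.inr ⟨y, hy, hya⟩

-- the three facts about mins the main argument uses, for s nonempty (s = scores ++ [0]):
theorem pvMins_le_elem (s : List Int) (hs : s ≠ []) (i : Nat) (hi : i < s.length) :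
    (pvMins s).getD i 0 ≤ s.getD i 0 := by
  cases s with
  | nil => exact absurd rfl hs
  | cons x r =>
    rw [pvMins_getD x r i hi, List.getD_eq_getElem _ _ hi]
    refine foldl_min_le_mem _ _ _ ?_
    rw [List.mem_take_iff_getElem]
    exact ⟨i, by simpa using hi, rfl⟩

theorem pvMins_antitone (s : List Int) (hs : s ≠ []) (i j : Nat) (hij : i ≤ j)
    (hj : j < s.length) :
    (pvMins s).getD j 0 ≤ (pvMins s).getD i 0 := by
  cases s with
  | nil => exact absurd rfl hs
  | cons x r =>
    rw [pvMins_getD x r i (by omega), pvMins_getD x r j hj]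
    have hsplit : (x :: r).take (j + 1)
        = (x :: r).take (i + 1) ++ (((x :: r).drop (i + 1)).take (j - i)) := by
      rw [← List.take_add]
      congr 1
      omega
    rw [hsplit, List.foldl_append]
    exact foldl_min_le_init _ _

theorem pvMins_le_iff (s : List Int) (hs : s ≠ []) (i : Nat) (hi : i < s.length) (a : Int) :
    (pvMins s).getD i 0 ≤ a ↔ ∃ y ∈ s.take (i + 1), y ≤ a := by
  cases s with
  | nil => exact absurd rfl hs
  | cons x r =>
    rw [pvMins_getD x r i hi, foldl_min_le_iff ((x :: r).take (i + 1)) a x]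
    constructor
    · rintro (h | h)
      · exact ⟨x, by simp, h⟩
      · exact h
    · exact Or.inr

-- the binary search returns the first index in [lo, hi) whose mins-value is ≤ a (hi when none),
-- provided mins is non-increasing there
theorem pvBisect_spec (mins : List Int) (a : Int)
    (hmono : ∀ i j, i ≤ j → j < mins.length → mins.getD j 0 ≤ mins.getD i 0) :
    ∀ n lo hi, hi - lo = n → hi ≤ mins.length → lo ≤ hi →
      lo ≤ pvBisect mins a lo hi ∧ pvBisect mins a lo hi ≤ hi ∧
      (∀ k, lo ≤ k → k < pvBisect mins a lo hi → a < mins.getD k 0) ∧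
      (pvBisect mins a lo hi < hi → mins.getD (pvBisect mins a lo hi) 0 ≤ a) := by
  intro n
  induction n using Nat.strong_induction_on with
  | _ n ih =>
    intro lo hi hn hhi hlohi
    by_cases h : lo < hi
    · rw [pvBisect, dif_pos h]
      set mid := (lo + hi) / 2 with hmid
      have hmid1 : lo ≤ mid := by omega
      have hmid2 : mid < hi := by omega
      by_cases hle : mins.getD mid 0 ≤ a
      · rw [if_pos hle]
        obtain ⟨h1, h2, h3, h4⟩ := ih (mid - lo) (by omega) lo mid rfl (by omega) (by omega)
        refine ⟨h1, by omega, h3, ?_⟩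
        intro _
        rcases Nat.lt_or_ge (pvBisect mins a lo mid) mid with hr | hr
        · exact h4 hr
        · have : pvBisect mins a lo mid = mid := by omega
          rwa [this]
      · rw [if_neg hle]
        obtain ⟨h1, h2, h3, h4⟩ := ih (hi - (mid + 1)) (by omega) (mid + 1) hi rfl hhi (by omega)
        refine ⟨by omega, h2, ?_, h4⟩
        intro k hk1 hk2
        rcases Nat.lt_or_ge k (mid + 1) with hkm | hkm
        · have hmm : mins.getD mid 0 ≤ mins.getD k 0 := hmono k mid (by omega) (by omega)
          omega
        · exact h3 k hkm hk2
    · rw [pvBisect, dif_neg h]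
      exact ⟨le_refl _, by omega, by omega, by omega⟩

-- The core correspondence: whenever A's scores pointer lo sits at a running-minimum position of s
-- (which it always does: it only stops on a value ≤ everything before it), the remaining run of A's
-- merge equals B's binary-search loop started at lo.
theorem pvAB_loop_eq (s : List Int) (hs : s ≠ []) (alice : List Int) :
    ∀ n j lo acc, alice.length - j = n → lo < s.length →
      (∀ k, k < lo → s.getD lo 0 ≤ s.getD k 0) →
      pvA_loop s alice lo j acc = pvB_loop (pvMins s) (alice.drop j) lo acc := by
  have hlen : (pvMins s).length = s.length := pvMins_length s
  have hmono : ∀ i j, i ≤ j → j < (pvMins s).length →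
      (pvMins s).getD j 0 ≤ (pvMins s).getD i 0 := by
    intro i j hij hj
    exact pvMins_antitone s hs i j hij (by omega)
  intro n
  induction n with
  | zero =>
    intro j lo acc hn hlo _
    rw [pvA_loop, dif_neg (by omega), List.drop_eq_nil_of_le (by omega), pvB_loop]
  | succ m ihn =>
    intro j lo acc hn hlo hinv
    have hj : j < alice.length := by omega
    have hdropj : alice.drop j = alice.getD j 0 :: alice.drop (j + 1) := by
      rw [List.drop_eq_getElem_cons hj, List.getD_eq_getElem _ _ hj]
    rw [hdropj]
    set a := alice.getD j 0 with ha
    obtain ⟨hb1, hb2, hb3, hb4⟩ :=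
      pvBisect_spec (pvMins s) a hmono ((pvMins s).length - lo) lo (pvMins s).length rfl
        (le_refl _) (by omega)
    set rr := pvBisect (pvMins s) a lo (pvMins s).length with hrr
    by_cases hend : rr = (pvMins s).length
    · -- no remaining entry is ≤ a: A scans off the end, B stops; both return acc
      have hB : pvB_loop (pvMins s) (a :: alice.drop (j + 1)) lo acc = acc := by
        rw [pvB_loop]; simp only [← hrr, if_pos hend]
      rw [hB]
      apply pvA_scan_none s alice j hj lo acc
      rw [List.findIdx?_eq_none_iff]
      intro y hy
      obtain ⟨e, he, hye⟩ := List.mem_iff_getElem.mp hy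
      have hes : lo + e < s.length := by
        have := he; simp only [List.length_drop] at this; omega
      have hyv : y = s[lo + e] := by
        rw [← hye, List.getElem_drop]
      have hml : a < (pvMins s).getD (lo + e) 0 := hb3 (lo + e) (by omega) (by omega)
      have hse : (pvMins s).getD (lo + e) 0 ≤ s.getD (lo + e) 0 :=
        pvMins_le_elem s hs (lo + e) hes
      rw [List.getD_eq_getElem _ _ hes] at hse
      have hya : ¬ (y ≤ a) := by rw [hyv]; omega
      simpa [← ha] using hya
    · have hrlt : rr < s.length := by omega
      -- every skipped entry is > a …
      have hgt : ∀ k, lo ≤ k → k < rr → a < s.getD k 0 := by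
        intro k hk1 hk2
        have h1 := hb3 k hk1 hk2
        have h2 := pvMins_le_elem s hs k (by omega)
        omega
      -- … and the entry at rr is ≤ a
      have hra : s.getD rr 0 ≤ a := by
        have h1 : (pvMins s).getD rr 0 ≤ a := hb4 (by omega)
        obtain ⟨y, hy, hya⟩ := (pvMins_le_iff s hs rr hrlt a).mp h1
        obtain ⟨e, he, hye⟩ := List.mem_iff_getElem.mp hy
        have hek : e ≤ rr ∧ e < s.length := by
          have h2 := he
          simp only [List.length_take] at h2
          constructor <;> omega
        have hyv : y = s.getD e 0 := by
          rw [List.getD_eq_getElem _ _ hek.2, ← hye, List.getElem_take]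
        rcases Nat.lt_or_ge e lo with helo | helo
        · -- an early hit: then s[lo] ≤ a already, so rr = lo
          have hlo_a : s.getD lo 0 ≤ a := le_trans (hinv e helo) (by omega)
          rcases Nat.lt_or_ge lo rr with hlorr | hlorr
          · exact absurd hlo_a (by have := hgt lo (le_refl _) hlorr; omega)
          · have hrl : rr = lo := by omega
            rwa [hrl]
        · rcases Nat.lt_or_ge e rr with herr | herr
          · exact absurd (hgt e helo herr) (by omega)
          · have her : e = rr := by omega
            rw [← her]; omega
      -- A's scan for this query lands exactly at rr
      have hfind : (s.drop lo).findIdx? (fun y => y ≤ a) = some (rr - lo) := by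
        rw [List.findIdx?_eq_some_iff_getElem]
        have hlendrop : rr - lo < (s.drop lo).length := by
          simp only [List.length_drop]; omega
        refine ⟨hlendrop, ?_, ?_⟩
        · have hg : (s.drop lo)[rr - lo] = s[lo + (rr - lo)]'(by omega) := List.getElem_drop
          rw [hg]
          simp only [decide_eq_true_eq]
          rw [← List.getD_eq_getElem s 0 (by omega : lo + (rr - lo) < s.length)]
          have hlr : lo + (rr - lo) = rr := by omega
          rw [hlr]
          exact hra
        · intro e he
          have hg : (s.drop lo)[e]'(by simp only [List.length_drop]; omega)
              = s[lo + e]'(by omega) := List.getElem_drop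
          rw [hg]
          simp only [decide_eq_true_eq]
          have := hgt (lo + e) (by omega) (by omega)
          rw [List.getD_eq_getElem _ _ (by omega : lo + e < s.length)] at this
          omega
      have hA := pvA_scan_some s alice j hj lo (rr - lo) acc (by simpa [← ha] using hfind)
      have hlorr : lo + (rr - lo) = rr := by omega
      rw [hlorr] at hA
      rw [hA]
      have hB : pvB_loop (pvMins s) (a :: alice.drop (j + 1)) lo acc
          = pvB_loop (pvMins s) (alice.drop (j + 1)) rr (acc ++ [(rr : Int) + 1]) := by
        rw [pvB_loop]; simp only [← hrr, if_neg hend]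
      rw [hB]
      -- the pointer again rests at a running-minimum position
      have hinv' : ∀ k, k < rr → s.getD rr 0 ≤ s.getD k 0 := by
        intro k hk
        rcases Nat.lt_or_ge k lo with hkl | hkl
        · rcases Nat.lt_or_ge lo rr with hlr | hlr
          · have := hgt lo (le_refl _) hlr
            have h2 := hinv k hkl
            omega
          · have hrl : rr = lo := by omega
            rw [hrl]; exact hinv k hkl
        · have := hgt k hkl hk
          omega
      exact ihn (j + 1) rr (acc ++ [(rr : Int) + 1]) (by omega) hrlt hinv'

-- ===== VERDICT (by name: the statement is the Claim_ definition above) =====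
theorem find_positions_in_desc_order_spec : Claim_equal_find_positions_in_desc_order := by
  intro scores alice _
  unfold Spec_find_positions_in_desc_order find_positions_in_desc_order find_positions_in_desc_order_alt
  have hne : scores ++ [0] ≠ [] := by simp
  have := pvAB_loop_eq (scores ++ [0]) hne alice (alice.length - 0) 0 0 [] rfl (by simp) (by omega)
  simpa using this
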